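-- pv_equiv track=rewrite | github.com/wbwhdrhadl/Baekjoon-Algorithm | 백준/Silver/1697. 숨바꼭질/숨바꼭질.py | bfs
-- ===== SOURCE A (Python) =====
-- from collections import deque
--
-- def bfs(n,k):
--     MAX = 100000
--
--     graph = [0] * (MAX + 1)
--
--     queue = deque([n])
--
--     while queue:
--         x = queue.popleft()
--
--         if x == k:
--             return graph[x]
--
--         for nx in (x-1, x+1, 2*x):
--
--             if 0<=nx<=MAX and graph[nx]==0:
--                 graph[nx] = graph[x]+1
--                 queue.append(nx)
-- ===== SOURCE B (Python) =====
-- def bfs(n, k):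
--     # Backward level-order BFS from k over the reversed moves
--     # (predecessors y-1, y+1, y//2 for even y), counting levels until n appears.
--     MAX = 100000
--     visited = [False] * (MAX + 1)
--     visited[k] = True
--     frontier = [k]
--     dist = 0
--     while frontier:
--         if n in frontier:
--             return dist
--         nxt = []
--         for y in frontier:
--             preds = [y - 1, y + 1]
--             if y % 2 == 0:
--                 preds.append(y // 2)
--             for p in preds:
--                 if 0 <= p <= MAX and not visited[p]:
--                     visited[p] = True
--                     nxt.append(p)
--         frontier = nxt
--         dist += 1
-- ===== Notes on version B (the rewrite author's own statement) =====
-- stated objective: alternative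
-- what changed: Replaces A's forward deque BFS with per-node distances stored in the graph array by a backward level-order BFS from k over the reversed moves (predecessors y-1, y+1 and y//2 for even y) with a visited board, returning the level at which n first appears.
-- outside the precondition, e.g. on bfs(-1, 5): A returns 5, B returns None; on bfs(-3, -3): A returns 0, B returns 0; on bfs(-3, 7): A returns None, B returns None
import Mathlib
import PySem

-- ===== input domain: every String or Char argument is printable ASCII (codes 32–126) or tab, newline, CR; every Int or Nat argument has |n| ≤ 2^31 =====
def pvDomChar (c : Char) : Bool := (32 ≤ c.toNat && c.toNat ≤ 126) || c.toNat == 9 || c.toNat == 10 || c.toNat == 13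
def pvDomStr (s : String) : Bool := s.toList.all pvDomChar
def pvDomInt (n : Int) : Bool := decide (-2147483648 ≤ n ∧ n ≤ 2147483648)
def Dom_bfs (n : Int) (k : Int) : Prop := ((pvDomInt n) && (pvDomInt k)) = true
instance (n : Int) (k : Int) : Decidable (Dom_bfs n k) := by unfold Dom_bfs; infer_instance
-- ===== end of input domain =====

-- B replaces A's forward deque BFS (per-node distances stored in the graph array) by a
-- backward level-order BFS from k over the reversed moves (predecessors y-1, y+1, y//2 for
-- even y) with a visited set, returning the level at which n first appears
-- (objective: alternative algorithmic decomposition, same asymptotic cost).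

def MAXC : Int := 100000

-- ===== PORT A =====
-- graph[i] access/update (all indices are nonnegative and in range in the traced loop)
def agetI (a : Array Int) (i : Int) : Int := a.getD i.toNat 0
def asetI (a : Array Int) (i : Int) (v : Int) : Array Int := a.setIfInBounds i.toNat v

-- body of A's `for nx in (x-1, x+1, 2*x)` loop, one neighbour
def stepA (x : Int) (gb : Array Int × List Int) (nx : Int) : Array Int × List Int :=
  if 0 ≤ nx ∧ nx ≤ MAXC ∧ agetI gb.1 nx = 0 then
    (asetI gb.1 nx (agetI gb.1 x + 1), nx :: gb.2)
  else gb

-- A's `while queue` loop; the deque is the functional queue front ++ back.reverse,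
-- fuel-bounded (the Python loop pops at most 100002 times, fuel 250000 is never exhausted)
def loopA (k : Int) : Nat → Array Int → List Int → List Int → Int
  | 0, _, _, _ => 0
  | fuel+1, g, [], back =>
    match back.reverse with
    | [] => 0                       -- queue empty: Python A returns None (outside Pre_)
    | x :: f =>
      if x = k then agetI g x
      else
        let gb := [x - 1, x + 1, 2 * x].foldl (stepA x) (g, ([] : List Int))
        loopA k fuel gb.1 f gb.2
  | fuel+1, g, x :: f, back =>
      if x = k then agetI g x
      else
        let gb := [x - 1, x + 1, 2 * x].foldl (stepA x) (g, back)
        loopA k fuel gb.1 f gb.2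

def bfs (n : Int) (k : Int) : Int :=
  loopA k 250000 (Array.replicate 100001 0) [n] []

-- ===== PORT B =====
-- visited board access/update (used only behind the 0 <= p <= MAX bounds check)
def agetB (a : Array Bool) (i : Int) : Bool := a.getD i.toNat false
def asetB (a : Array Bool) (i : Int) (v : Bool) : Array Bool := a.setIfInBounds i.toNat v

-- predecessors of y under the moves x-1, x+1, 2*x: B's `preds` list
def predsB (y : Int) : List Int :=
  [y - 1, y + 1] ++ (if PySem.Int.mod y 2 = 0 then [PySem.Int.floordiv y 2] else [])

-- body of B's `for p in preds` loop, one candidate predecessor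
def stepNB (vn : Array Bool × List Int) (p : Int) : Array Bool × List Int :=
  if 0 ≤ p ∧ p ≤ MAXC ∧ agetB vn.1 p = false then
    (asetB vn.1 p true, vn.2 ++ [p])
  else vn

-- B's `while frontier` loop: one fuel tick per BFS level (the level count is ≤ 200002,
-- fuel 250000 is never exhausted on admitted inputs)
def loopBk (n : Int) : Nat → Array Bool → List Int → Int → Int
  | 0, _, _, _ => 0
  | fuel+1, vis, frontier, dist =>
    if frontier = [] then 0         -- frontier empty: Python B returns None (outside Pre_)
    else if n ∈ frontier then dist
    else
      let vn := frontier.foldl (fun acc y => (predsB y).foldl stepNB acc) (vis, ([] : List Int))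
      loopBk n fuel vn.1 vn.2 (dist + 1)

def bfs_alt (n : Int) (k : Int) : Int :=
  loopBk n 250000 (asetB (Array.replicate 100001 false) k true) [k] 0

-- ===== PRECONDITION & SPEC =====
-- Pre_ restricts to the problem's board 0 ≤ n,k ≤ 100000: outside it Python A raises
-- IndexError, returns None (no int), or returns ints only through negative-index wraparound
-- (n = -1 wraps to the list's last cell and A runs a shifted BFS; k == n < 0 reads graph[k]
-- by wraparound and returns 0), accidental behaviour B does not mirror.
def Pre_bfs (n : Int) (k : Int) : Prop :=
  0 ≤ n ∧ n ≤ 100000 ∧ 0 ≤ k ∧ k ≤ 100000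
instance (n : Int) (k : Int) : Decidable (Pre_bfs n k) := by unfold Pre_bfs; infer_instance

def pvWitness_bfs : Int × Int := (3, 17)

def Spec_bfs (n : Int) (k : Int) (out : Int) : Prop := out = bfs_alt n k
instance (n : Int) (k : Int) (out : Int) : Decidable (Spec_bfs n k out) := by unfold Spec_bfs; infer_instance

-- ===== CLAIM (what is proved, stated in full; the proofs are below) =====
def Claim_equal_bfs : Prop := ∀ (n : Int) (k : Int), Dom_bfs n k → Pre_bfs n k → Spec_bfs n k (bfs n k)

-- ===== LEMMAS AND PROOFS =====

-- ---------- generic reachability theory ----------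

def inb (x : Int) : Prop := 0 ≤ x ∧ x ≤ MAXC

-- one forward move of A's BFS (target kept on the board)
def StepF (x y : Int) : Prop := (y = x - 1 ∨ y = x + 1 ∨ y = 2 * x) ∧ 0 ≤ y ∧ y ≤ MAXC

-- one backward move of B's BFS (target kept on the board)
def StepB (y p : Int) : Prop := p ∈ predsB y ∧ 0 ≤ p ∧ p ≤ MAXC

inductive Rch (st : Int → Int → Prop) (s : Int) : ℕ → Int → Prop
  | zero : Rch st s 0 s
  | succ {d x y} : Rch st s d x → st x y → Rch st s (d + 1) y

noncomputable def rdist (st : Int → Int → Prop) (s y : Int) : ℕ := sInf {d | Rch st s d y}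

-- a step relation usable by the generic lemmas: targets on the board, ±1 moves available
def GoodStep (st : Int → Int → Prop) : Prop :=
  (∀ x y, st x y → inb y) ∧ (∀ x, inb x → 1 ≤ x → st x (x - 1)) ∧
  (∀ x, inb x → x + 1 ≤ MAXC → st x (x + 1))

lemma goodF : GoodStep StepF := by
  refine ⟨fun x y h => ⟨h.2.1, h.2.2⟩, ?_, ?_⟩
  · intro x hx h1
    obtain ⟨hx0, hx1⟩ := hx
    exact ⟨Or.inl rfl, by omega, by omega⟩
  · intro x hx h1
    obtain ⟨hx0, hx1⟩ := hx
    exact ⟨Or.inr (Or.inl rfl), by omega, h1⟩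

lemma memPredsB_sub (y : Int) : y - 1 ∈ predsB y := by simp [predsB]

lemma memPredsB_add (y : Int) : y + 1 ∈ predsB y := by simp [predsB]

lemma goodB : GoodStep StepB := by
  refine ⟨fun x y h => ⟨h.2.1, h.2.2⟩, ?_, ?_⟩
  · intro x hx h1
    obtain ⟨hx0, hx1⟩ := hx
    exact ⟨memPredsB_sub x, by omega, by omega⟩
  · intro x hx h1
    obtain ⟨hx0, hx1⟩ := hx
    exact ⟨memPredsB_add x, by omega, h1⟩

lemma rch_inb {st : Int → Int → Prop} {s : Int} {d : ℕ} {y : Int}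
    (hg : GoodStep st) (hs : inb s) (h : Rch st s d y) : inb y := by
  induction h with
  | zero => exact hs
  | succ _ hst _ => exact hg.1 _ _ hst

lemma rch_exists {st : Int → Int → Prop} (hg : GoodStep st) {s y : Int}
    (hs : inb s) (hy : inb y) : ∃ d, d ≤ 200000 ∧ Rch st s d y := by
  have hM : MAXC = (100000 : Int) := rfl
  have hs0 := hs.1
  have hs1 := hs.2
  have hy0 := hy.1
  have hy1 := hy.2
  have hdn : ∀ m : ℕ, (m : Int) ≤ s → Rch st s m (s - m) := by
    intro m
    induction m with
    | zero => intro _; simpa using Rch.zero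
    | succ m ih =>
      intro hm
      have hm' : (m : Int) ≤ s := by push_cast at hm ⊢; omega
      have h1 : Rch st s m (s - m) := ih hm'
      have h2 : st (s - m) (s - m - 1) := by
        refine hg.2.1 _ ⟨by push_cast at hm ⊢; omega, ?_⟩ (by push_cast at hm ⊢; omega)
        have := hs.2
        omega
      have h3 := Rch.succ h1 h2
      have he : s - (m : Int) - 1 = s - ((m + 1 : ℕ) : Int) := by push_cast; ring
      rwa [he] at h3
  have h0 : Rch st s s.toNat 0 := by
    have h := hdn s.toNat (by omega)
    have he : s - (s.toNat : Int) = 0 := by omega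
    rwa [he] at h
  have hup : ∀ m : ℕ, (m : Int) ≤ MAXC → Rch st s (s.toNat + m) m := by
    intro m
    induction m with
    | zero => intro _; simpa using h0
    | succ m ih =>
      intro hm
      have h1 : Rch st s (s.toNat + m) m := ih (by push_cast at hm ⊢; omega)
      have h2 : st (m : Int) ((m : Int) + 1) := by
        refine hg.2.2 _ ⟨by positivity, ?_⟩ (by push_cast at hm ⊢; omega)
        push_cast at hm ⊢
        omega
      have h3 := Rch.succ h1 h2
      have he : ((m : Int) + 1) = ((m + 1 : ℕ) : Int) := by push_cast; ring
      rw [he] at h3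
      exact h3
  have h := hup y.toNat (by omega)
  have he : ((y.toNat : ℕ) : Int) = y := by omega
  rw [he] at h
  refine ⟨s.toNat + y.toNat, ?_, h⟩
  have h1 := hs.2
  have h2 := hy.2
  rw [hM] at h1 h2
  omega

lemma rdist_le {st : Int → Int → Prop} {s y : Int} {d : ℕ} (h : Rch st s d y) :
    rdist st s y ≤ d := Nat.sInf_le h

lemma rdist_reach {st : Int → Int → Prop} (hg : GoodStep st) {s y : Int}
    (hs : inb s) (hy : inb y) : Rch st s (rdist st s y) y := by
  obtain ⟨d, _, hd⟩ := rch_exists hg hs hy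
  have hne : {e | Rch st s e y}.Nonempty := ⟨d, hd⟩
  exact Nat.sInf_mem hne

lemma rdist_bound {st : Int → Int → Prop} (hg : GoodStep st) {s y : Int}
    (hs : inb s) (hy : inb y) : rdist st s y ≤ 200000 := by
  obtain ⟨d, hle, hd⟩ := rch_exists hg hs hy
  exact le_trans (rdist_le hd) hle

lemma rdist_self {st : Int → Int → Prop} (s : Int) : rdist st s s = 0 :=
  Nat.le_zero.mp (rdist_le Rch.zero)

lemma rdist_eq_zero {st : Int → Int → Prop} (hg : GoodStep st) {s y : Int}
    (hs : inb s) (hy : inb y) (h : rdist st s y = 0) : y = s := by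
  have hr := rdist_reach hg hs hy
  rw [h] at hr
  cases hr
  rfl

lemma rdist_pred {st : Int → Int → Prop} (hg : GoodStep st) {s y : Int} {e : ℕ}
    (hs : inb s) (hy : inb y) (h : rdist st s y = e + 1) :
    ∃ x, inb x ∧ rdist st s x = e ∧ st x y := by
  have hr := rdist_reach hg hs hy
  rw [h] at hr
  cases hr with
  | @succ d x _ hx hst =>
    refine ⟨x, rch_inb hg hs hx, ?_, hst⟩
    have h1 : rdist st s x ≤ e := rdist_le hx
    rcases Nat.lt_or_ge (rdist st s x) e with hlt | hge
    · exfalso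
      have h2 : Rch st s (rdist st s x + 1) y :=
        Rch.succ (rdist_reach hg hs (rch_inb hg hs hx)) hst
      have h3 := rdist_le h2
      omega
    · omega

lemma exists_at_dist {st : Int → Int → Prop} (hg : GoodStep st) {s y : Int}
    (hs : inb s) (hy : inb y) : ∀ j, j ≤ rdist st s y → ∃ z, inb z ∧ rdist st s z = j := by
  have key : ∀ m : ℕ, m ≤ rdist st s y → ∃ z, inb z ∧ rdist st s z = rdist st s y - m := by
    intro m
    induction m with
    | zero => intro _; exact ⟨y, hy, by omega⟩
    | succ m ih =>
      intro hm
      obtain ⟨z, hz, hzd⟩ := ih (by omega)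
      have he : rdist st s z = (rdist st s y - (m + 1)) + 1 := by omega
      obtain ⟨x, hx, hxd, _⟩ := rdist_pred hg hs hz he
      exact ⟨x, hx, hxd⟩
  intro j hj
  obtain ⟨z, hz, hzd⟩ := key (rdist st s y - j) (by omega)
  exact ⟨z, hz, by omega⟩

lemma rch_frontExt {st : Int → Int → Prop} {a b t : Int} {d : ℕ}
    (hab : st a b) (h : Rch st b d t) : Rch st a (d + 1) t := by
  induction h with
  | zero => exact Rch.succ Rch.zero hab
  | succ _ hst ih => exact Rch.succ ih hst

lemma rch_rev {st st' : Int → Int → Prop} (hg : GoodStep st)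
    (hrev : ∀ x y, inb x → st x y → st' y x) {s : Int} (hs : inb s) :
    ∀ {d y}, Rch st s d y → Rch st' y d s := by
  intro d y h
  induction h with
  | zero => exact Rch.zero
  | succ hx hst ih =>
    exact rch_frontExt (hrev _ _ (rch_inb hg hs hx) hst) ih

-- edge correspondence: forward move x→y reversed is a backward move y→x
lemma stepFB {x y : Int} (hx : inb x) (h : StepF x y) : StepB y x := by
  obtain ⟨hmv, hy0, hy1⟩ := h
  refine ⟨?_, hx.1, hx.2⟩
  rcases hmv with h1 | h1 | h1
  · have hx1 : x = y + 1 := by omega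
    rw [hx1]; exact memPredsB_add y
  · have hx1 : x = y - 1 := by omega
    rw [hx1]; exact memPredsB_sub y
  · simp [predsB]
    right; right
    exact ⟨⟨x, by omega⟩, by omega⟩

lemma stepBF {y p : Int} (hy : inb y) (h : StepB y p) : StepF p y := by
  obtain ⟨hmem, hp0, hp1⟩ := h
  refine ⟨?_, hy.1, hy.2⟩
  unfold predsB at hmem
  rcases List.mem_append.mp hmem with h1 | h1
  · simp only [List.mem_cons, List.not_mem_nil, or_false] at h1
    rcases h1 with h1 | h1
    · right; left; omega
    · left; omega
  · by_cases hmod : PySem.Int.mod y 2 = 0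
    · rw [if_pos hmod] at h1
      simp only [List.mem_cons, List.not_mem_nil, or_false] at h1
      rw [PySem.Int.mod_eq_emod_of_pos (by norm_num)] at hmod
      rw [PySem.Int.floordiv_eq_ediv_of_pos (by norm_num)] at h1
      right; right; omega
    · rw [if_neg hmod] at h1
      simp at h1

lemma rdist_FB (n k : Int) (hn : inb n) (hk : inb k) :
    rdist StepF n k = rdist StepB k n := by
  unfold rdist
  congr 1
  ext d
  constructor
  · intro h; exact rch_rev goodF (fun x y hx hst => stepFB hx hst) hn h
  · intro h; exact rch_rev goodB (fun x y hx hst => stepBF hx hst) hk h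

-- ---------- array bookkeeping for A ----------

lemma size_asetI (a : Array Int) (i v : Int) : (asetI a i v).size = a.size :=
  Array.size_setIfInBounds ..

lemma agetI_asetI_self (a : Array Int) (i v : Int) (h : i.toNat < a.size) :
    agetI (asetI a i v) i = v := by
  simp [agetI, asetI, Array.getD_eq_getD_getElem?, h]

lemma agetI_asetI_ne (a : Array Int) (i j v : Int) (h0 : 0 ≤ i) (h1 : 0 ≤ j) (hne : i ≠ j) :
    agetI (asetI a i v) j = agetI a j := by
  have h : i.toNat ≠ j.toNat := by omega
  simp [agetI, asetI, Array.getD_eq_getD_getElem?, h]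

lemma agetI_replicate (i : Int) : agetI (Array.replicate 100001 (0 : Int)) i = 0 := by
  simp [agetI, Array.getD_eq_getD_getElem?, Array.getElem?_replicate]
  split <;> rfl

def cntZero (g : Array Int) : ℕ := g.toList.count 0

lemma count_set_ne {l : List Int} {j : ℕ} {v : Int} (hj : j < l.length)
    (h0 : l[j] = 0) (hv : v ≠ 0) : (l.set j v).count 0 + 1 = l.count 0 := by
  induction l generalizing j with
  | nil => simp at hj
  | cons a l ih =>
    cases j with
    | zero =>
      simp only [List.getElem_cons_zero] at h0
      subst h0
      simp [hv]
    | succ j =>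
      simp only [List.length_cons, Nat.add_lt_add_iff_right] at hj
      simp only [List.getElem_cons_succ] at h0
      have := ih hj h0
      simp only [List.set_cons_succ, List.count_cons]
      omega

lemma cntZero_set (g : Array Int) (i v : Int) (h : i.toNat < g.size)
    (h0 : agetI g i = 0) (hv : v ≠ 0) : cntZero (asetI g i v) + 1 = cntZero g := by
  unfold cntZero asetI
  rw [Array.toList_setIfInBounds]
  have hlen : i.toNat < g.toList.length := by simpa using h
  refine count_set_ne hlen ?_ hv
  have he : agetI g i = g.toList[i.toNat] := by
    simp [agetI, Array.getD_eq_getD_getElem?, h]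
  rw [← he]
  exact h0

lemma cntZero_replicate : cntZero (Array.replicate 100001 (0 : Int)) = 100001 := by
  unfold cntZero
  rw [Array.toList_replicate, List.count_replicate_self]

-- ---------- A's loop computes the forward distance ----------

-- one neighbour nx of the popped node x, with its semantic payload
lemma stepSem (n : Int) (g : Array Int) (b : List Int) (x nx : Int) (d : ℕ)
    (hsz : g.size = 100001) (hxd : agetI g x = (d : Int))
    (hgood : Rch StepF n d x ∨ ∀ y, StepF x y → agetI g y ≠ 0)
    (hcomp : ∀ z, inb z → z ≠ n → rdist StepF n z ≤ d → agetI g z ≠ 0)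
    (hnx : nx = x - 1 ∨ nx = x + 1 ∨ nx = 2 * x) :
    ∃ g' w, stepA x (g, b) nx = (g', w ++ b) ∧ g'.size = 100001 ∧
      cntZero g' + w.length = cntZero g ∧
      (∀ z, inb z → agetI g z ≠ 0 → agetI g' z = agetI g z) ∧
      (∀ z, inb z → agetI g' z ≠ 0 → agetI g z ≠ 0 ∨ z ∈ w) ∧
      (∀ v ∈ w, inb v ∧ agetI g' v = (d : Int) + 1 ∧ agetI g v = 0 ∧
        (v ≠ n → rdist StepF n v = d + 1)) ∧
      ((0 ≤ nx ∧ nx ≤ MAXC) → agetI g' nx ≠ 0) ∧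
      (∀ z, inb z → z ≠ nx → agetI g' z = agetI g z) := by
  by_cases hc : 0 ≤ nx ∧ nx ≤ MAXC ∧ agetI g nx = 0
  · obtain ⟨hnx0, hnx1, hz⟩ := hc
    have hnxinb : inb nx := ⟨hnx0, hnx1⟩
    have hstep : StepF x nx := ⟨hnx, hnx0, hnx1⟩
    have hreach : Rch StepF n d x := by
      rcases hgood with h | h
      · exact h
      · exact absurd hz (h nx hstep)
    have hlt : nx.toNat < g.size := by
      have : MAXC = (100000 : Int) := rfl
      rw [this] at hnx1
      omega
    have hval : agetI (asetI g nx (agetI g x + 1)) nx = (d : Int) + 1 := by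
      rw [agetI_asetI_self g nx _ hlt, hxd]
    refine ⟨asetI g nx (agetI g x + 1), [nx], ?_, ?_, ?_, ?_, ?_, ?_, ?_, ?_⟩
    · simp [stepA, hnx0, hnx1, hz]
    · simp [size_asetI, hsz]
    · simp only [List.length_cons, List.length_nil]
      exact cntZero_set g nx _ hlt hz (by rw [hxd]; positivity)
    · intro z hzin hzm
      have hne : nx ≠ z := fun h => hzm (h ▸ hz)
      exact agetI_asetI_ne g nx z _ hnx0 hzin.1 hne
    · intro z hzin hzm
      by_cases hzz : z = nx
      · right; simp [hzz]
      · left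
        rwa [agetI_asetI_ne g nx z _ hnx0 hzin.1 (fun h => hzz h.symm)] at hzm
    · intro v hv
      rcases List.mem_singleton.mp hv with rfl
      refine ⟨hnxinb, hval, hz, ?_⟩
      intro hvn
      have hle : rdist StepF n v ≤ d + 1 := rdist_le (Rch.succ hreach hstep)
      have hge : ¬ rdist StepF n v ≤ d := fun h => (hcomp v hnxinb hvn h) hz
      omega
    · intro _
      rw [hval]
      positivity
    · intro z hz hne
      exact agetI_asetI_ne g nx z _ hnx0 hz.1 (fun h => hne h.symm)
  · refine ⟨g, [], ?_, hsz, by simp, fun z _ _ => rfl, fun z _ h => Or.inl h, by simp, ?_,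
      fun z _ _ => rfl⟩
    · simp [stepA, if_neg hc]
    · intro hb h0
      exact hc ⟨hb.1, hb.2, h0⟩

-- the whole `for nx in (x-1, x+1, 2*x)` body of one pop, with its semantic payload
lemma expandSem (n : Int) (g : Array Int) (b : List Int) (x : Int) (d : ℕ)
    (hsz : g.size = 100001) (hxinb : inb x) (hxd : agetI g x = (d : Int))
    (hgood : Rch StepF n d x ∨ ∀ y, StepF x y → agetI g y ≠ 0)
    (hcomp : ∀ z, inb z → z ≠ n → rdist StepF n z ≤ d → agetI g z ≠ 0) :
    ∃ g' w, [x - 1, x + 1, 2 * x].foldl (stepA x) (g, b) = (g', w ++ b) ∧ g'.size = 100001 ∧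
      cntZero g' + w.length = cntZero g ∧
      (∀ z, inb z → agetI g z ≠ 0 → agetI g' z = agetI g z) ∧
      (∀ z, inb z → agetI g' z ≠ 0 → agetI g z ≠ 0 ∨ z ∈ w) ∧
      (∀ v ∈ w, inb v ∧ agetI g' v = (d : Int) + 1 ∧ agetI g v = 0 ∧
        (v ≠ n → rdist StepF n v = d + 1)) ∧
      (∀ y, StepF x y → agetI g' y ≠ 0) := by
  obtain ⟨g1, w1, he1, hsz1, hcnt1, hpres1, hnew1, hw1, hmk1, hun1⟩ :=
    stepSem n g b x (x - 1) d hsz hxd hgood hcomp (Or.inl rfl)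
  have hxd1 : agetI g1 x = (d : Int) := by
    rw [hun1 x hxinb (by omega)]; exact hxd
  have hgood1 : Rch StepF n d x ∨ ∀ y, StepF x y → agetI g1 y ≠ 0 := by
    rcases hgood with h | h
    · exact Or.inl h
    · refine Or.inr fun y hy => ?_
      have hin : inb y := ⟨hy.2.1, hy.2.2⟩
      rw [hpres1 y hin (h y hy)]; exact h y hy
  have hcomp1 : ∀ z, inb z → z ≠ n → rdist StepF n z ≤ d → agetI g1 z ≠ 0 := by
    intro z hz hzn hzd
    rw [hpres1 z hz (hcomp z hz hzn hzd)]; exact hcomp z hz hzn hzd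
  obtain ⟨g2, w2, he2, hsz2, hcnt2, hpres2, hnew2, hw2, hmk2, hun2⟩ :=
    stepSem n g1 (w1 ++ b) x (x + 1) d hsz1 hxd1 hgood1 hcomp1 (Or.inr (Or.inl rfl))
  have hxd2 : agetI g2 x = (d : Int) := by
    rw [hun2 x hxinb (by omega)]; exact hxd1
  have hgood2 : Rch StepF n d x ∨ ∀ y, StepF x y → agetI g2 y ≠ 0 := by
    rcases hgood1 with h | h
    · exact Or.inl h
    · refine Or.inr fun y hy => ?_
      have hin : inb y := ⟨hy.2.1, hy.2.2⟩
      rw [hpres2 y hin (h y hy)]; exact h y hy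
  have hcomp2 : ∀ z, inb z → z ≠ n → rdist StepF n z ≤ d → agetI g2 z ≠ 0 := by
    intro z hz hzn hzd
    rw [hpres2 z hz (hcomp1 z hz hzn hzd)]; exact hcomp1 z hz hzn hzd
  obtain ⟨g3, w3, he3, hsz3, hcnt3, hpres3, hnew3, hw3, hmk3, hun3⟩ :=
    stepSem n g2 (w2 ++ (w1 ++ b)) x (2 * x) d hsz2 hxd2 hgood2 hcomp2 (Or.inr (Or.inr rfl))
  refine ⟨g3, w3 ++ w2 ++ w1, ?_, hsz3, ?_, ?_, ?_, ?_, ?_⟩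
  · simp only [List.foldl_cons, List.foldl_nil, he1, he2, he3]
    simp [List.append_assoc]
  · simp only [List.length_append]
    omega
  · intro z hz hm
    have e1 : agetI g1 z = agetI g z := hpres1 z hz hm
    have e2 : agetI g2 z = agetI g z := by rw [hpres2 z hz (by rw [e1]; exact hm), e1]
    rw [hpres3 z hz (by rw [e2]; exact hm), e2]
  · intro z hz hm
    rcases hnew3 z hz hm with hm2 | hw
    · rcases hnew2 z hz hm2 with hm1 | hw
      · rcases hnew1 z hz hm1 with hm0 | hw
        · exact Or.inl hm0
        · right; simp [hw]
      · right; simp [hw]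
    · right; simp [hw]
  · intro v hv
    simp only [List.append_assoc, List.mem_append] at hv
    rcases hv with hv | hv | hv
    · obtain ⟨hvi, hval, hold, hdist⟩ := hw3 v hv
      refine ⟨hvi, hval, ?_, hdist⟩
      by_contra hne
      have e1 : agetI g1 v = agetI g v := hpres1 v hvi hne
      have e2 : agetI g2 v = agetI g v := by rw [hpres2 v hvi (by rw [e1]; exact hne), e1]
      rw [e2] at hold
      exact hne hold
    · obtain ⟨hvi, hval, hold, hdist⟩ := hw2 v hv
      have hd0 : (d : Int) + 1 ≠ 0 := by positivity
      have e3 : agetI g3 v = agetI g2 v := hpres3 v hvi (by rw [hval]; exact hd0)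
      refine ⟨hvi, by rw [e3, hval], ?_, hdist⟩
      by_contra hne
      have e1 : agetI g1 v = agetI g v := hpres1 v hvi hne
      rw [e1] at hold
      exact hne hold
    · obtain ⟨hvi, hval, hold, hdist⟩ := hw1 v hv
      have hd0 : (d : Int) + 1 ≠ 0 := by positivity
      have e2 : agetI g2 v = agetI g1 v := hpres2 v hvi (by rw [hval]; exact hd0)
      have e3 : agetI g3 v = agetI g1 v := by
        rw [hpres3 v hvi (by rw [e2, hval]; exact hd0), e2]
      exact ⟨hvi, by rw [e3, hval], hold, hdist⟩
  · intro y hy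
    have hin : inb y := ⟨hy.2.1, hy.2.2⟩
    obtain ⟨hmv, hb0, hb1⟩ := hy
    rcases hmv with h1 | h1 | h1
    · subst h1
      have h2 : agetI g1 (x - 1) ≠ 0 := hmk1 ⟨hb0, hb1⟩
      have e2 : agetI g2 (x - 1) = agetI g1 (x - 1) := hpres2 _ hin h2
      have e3 : agetI g3 (x - 1) = agetI g1 (x - 1) := by
        rw [hpres3 _ hin (by rw [e2]; exact h2), e2]
      rw [e3]; exact h2
    · subst h1
      have h2 : agetI g2 (x + 1) ≠ 0 := hmk2 ⟨hb0, hb1⟩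
      have e3 : agetI g3 (x + 1) = agetI g2 (x + 1) := hpres3 _ hin h2
      rw [e3]; exact h2
    · subst h1
      exact hmk3 ⟨hb0, hb1⟩

-- unfolding equations for loopA (definitional)
lemma loopA_cons (k : Int) (fuel : Nat) (g : Array Int) (x : Int) (f back : List Int) :
    loopA k (fuel + 1) g (x :: f) back =
      if x = k then agetI g x
      else
        loopA k fuel ([x - 1, x + 1, 2 * x].foldl (stepA x) (g, back)).1 f
          ([x - 1, x + 1, 2 * x].foldl (stepA x) (g, back)).2 := rfl

-- popping from the functional deque: whatever split (front, back) holds the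
-- sequence x :: t, one step of loopA tests x and continues on a split of t
lemma popA (k : Int) (fuel : Nat) (g : Array Int) (front back : List Int) (x : Int) (t : List Int)
    (hseq : front ++ back.reverse = x :: t) :
    ∃ f b, f ++ b.reverse = t ∧
      loopA k (fuel + 1) g front back =
        (if x = k then agetI g x
         else loopA k fuel ([x - 1, x + 1, 2 * x].foldl (stepA x) (g, b)).1 f
                ([x - 1, x + 1, 2 * x].foldl (stepA x) (g, b)).2) := by
  cases front with
  | nil =>
    have hsr : back.reverse = x :: t := by simpa using hseq
    exact ⟨t, [], by simp, by simp [loopA, hsr]⟩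
  | cons y f0 =>
    have hy : y = x ∧ f0 ++ back.reverse = t := by simpa using hseq
    obtain ⟨rfl, hfb⟩ := hy
    exact ⟨f0, back, hfb, by simp [loopA]⟩

-- the loop invariant of A's BFS: queue split into the level-d segment q1 and the
-- level-(d+1) segment q2, P the ghost set of already-popped nodes
def InvA (n k : Int) (g : Array Int) (q1 q2 : List Int) (d : ℕ) (P : Int → Prop) : Prop :=
  1 ≤ d ∧
  (∀ x ∈ q1, inb x ∧ agetI g x = (d : Int)) ∧
  (∀ x ∈ q2, inb x ∧ agetI g x = (d : Int) + 1) ∧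
  (∀ z, inb z → z ≠ n → agetI g z ≠ 0 → agetI g z = (rdist StepF n z : Int)) ∧
  (∀ y, StepF n y → agetI g y ≠ 0) ∧
  (∀ z, inb z → z ≠ n → rdist StepF n z ≤ d → agetI g z ≠ 0) ∧
  (∀ y, inb y → y ≠ n → rdist StepF n y = d + 1 → agetI g y = 0 → ∃ x ∈ q1, StepF x y) ∧
  (agetI g k ≠ 0 → k ∈ q1 ∨ k ∈ q2) ∧
  (∀ z, inb z → agetI g z ≠ 0 → (z ∈ q1 ∨ z ∈ q2 ∨ P z)) ∧
  (∀ z, P z → z = n ∨ (inb z ∧ rdist StepF n z ≤ d))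

-- advancing to the next level when the level-d segment is exhausted
lemma invA_switch (n k : Int) (hn : inb n) (g : Array Int) (q2 : List Int) (d : ℕ)
    (P : Int → Prop) (h : InvA n k g [] q2 d P) : InvA n k g q2 [] (d + 1) P := by
  obtain ⟨hd1, hI1, hI2, hI3, hI4, hI5, hI6, hI7, hI10, hI11⟩ := h
  have hc : (((d + 1 : ℕ)) : Int) = (d : Int) + 1 := by push_cast; ring
  have hI5' : ∀ z, inb z → z ≠ n → rdist StepF n z ≤ d + 1 → agetI g z ≠ 0 := by
    intro z hz hzn hzd
    rcases Nat.lt_or_ge (rdist StepF n z) (d + 1) with hlt | hge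
    · exact hI5 z hz hzn (by omega)
    · have he : rdist StepF n z = d + 1 := by omega
      by_contra h0
      obtain ⟨x, hx, _⟩ := hI6 z hz hzn he (by omega)
      simp at hx
  refine ⟨by omega, ?_, by simp, hI3, hI4, hI5', ?_, ?_, ?_, ?_⟩
  · intro x hx
    obtain ⟨ha, hb⟩ := hI2 x hx
    exact ⟨ha, by rw [hc]; exact hb⟩
  · intro y hy hyn hyd h0
    obtain ⟨x', hx'i, hx'd, hst⟩ := rdist_pred goodF hn hy hyd
    have hx'n : x' ≠ n := by
      intro he
      rw [he, rdist_self] at hx'd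
      omega
    have hm : agetI g x' ≠ 0 := hI5' x' hx'i hx'n (by omega)
    rcases hI10 x' hx'i hm with h1 | h1 | h1
    · simp at h1
    · exact ⟨x', h1, hst⟩
    · rcases hI11 x' h1 with h2 | h2
      · exact absurd h2 hx'n
      · omega
  · intro hm
    rcases hI7 hm with h1 | h1
    · simp at h1
    · exact Or.inl h1
  · intro z hz hm
    rcases hI10 z hz hm with h1 | h1 | h1
    · simp at h1
    · exact Or.inl h1
    · exact Or.inr (Or.inr h1)
  · intro z hz
    rcases hI11 z hz with h1 | h1
    · exact Or.inl h1
    · exact Or.inr ⟨h1.1, by omega⟩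

-- the queue cannot empty before k is found
lemma invA_deadEnd (n k : Int) (hn : inb n) (hk : inb k) (hkn : k ≠ n) (g : Array Int)
    (d : ℕ) (P : Int → Prop) (h : InvA n k g [] [] d P) : False := by
  obtain ⟨hd1, hI1, hI2, hI3, hI4, hI5, hI6, hI7, hI10, hI11⟩ := h
  have hku : agetI g k = 0 := by
    by_contra hm
    rcases hI7 hm with h1 | h1 <;> simp at h1
  have hkd : d + 1 ≤ rdist StepF n k := by
    by_contra hlt
    exact (hI5 k hk hkn (by omega)) hku
  obtain ⟨z, hz, hzd⟩ := exists_at_dist goodF hn hk (d + 1) hkd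
  have hzn : z ≠ n := by
    intro he
    rw [he, rdist_self] at hzd
    omega
  by_cases hm : agetI g z = 0
  · obtain ⟨x, hx, _⟩ := hI6 z hz hzn hzd hm
    simp at hx
  · rcases hI10 z hz hm with h1 | h1 | h1
    · simp at h1
    · simp at h1
    · rcases hI11 z h1 with h2 | h2
      · exact absurd h2 hzn
      · omega

lemma loopA_eq (n k : Int) (hn : inb n) (hk : inb k) (hkn : k ≠ n) :
    ∀ (fuel : Nat) (g : Array Int) (front back q1 q2 : List Int) (d : ℕ) (P : Int → Prop),
      g.size = 100001 →
      front ++ back.reverse = q1 ++ q2 →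
      (q1 ++ q2).length + cntZero g + 1 ≤ fuel →
      InvA n k g q1 q2 d P →
      loopA k fuel g front back = (rdist StepF n k : Int) := by
  intro fuel
  induction fuel with
  | zero =>
    intro g front back q1 q2 d P _ _ hfuel _
    omega
  | succ fuel ih =>
    intro g front back q1 q2 d P hsz hq hfuel hInv
    have key : ∀ (x : Int) (q1t q2' : List Int) (d' : ℕ) (P' : Int → Prop),
        front ++ back.reverse = (x :: q1t) ++ q2' →
        ((x :: q1t) ++ q2').length + cntZero g + 1 ≤ fuel + 1 →
        InvA n k g (x :: q1t) q2' d' P' →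
        loopA k (fuel + 1) g front back = (rdist StepF n k : Int) := by
      intro x q1t q2' d' P' hq' hfuel' hI
      obtain ⟨hd1, hI1, hI2, hI3, hI4, hI5, hI6, hI7, hI10, hI11⟩ := hI
      obtain ⟨hxinb, hxval⟩ := hI1 x (List.mem_cons_self ..)
      have hxm : agetI g x ≠ 0 := by
        rw [hxval]
        have : (1 : Int) ≤ (d' : Int) := by exact_mod_cast hd1
        omega
      obtain ⟨f, bb, hfb, hA⟩ := popA k fuel g front back x (q1t ++ q2') (by simpa using hq')
      rw [hA]
      by_cases hxk : x = k
      · rw [if_pos hxk]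
        subst hxk
        exact hI3 x hk hkn hxm
      · rw [if_neg hxk]
        have hgood : Rch StepF n d' x ∨ ∀ y, StepF x y → agetI g y ≠ 0 := by
          by_cases hxn : x = n
          · subst hxn
            exact Or.inr hI4
          · left
            have h1 := hI3 x hxinb hxn hxm
            rw [hxval] at h1
            have h2 : rdist StepF n x = d' := by exact_mod_cast h1.symm
            rw [← h2]
            exact rdist_reach goodF hn hxinb
        obtain ⟨g', w, he, hsz', hcnt, hpres, hnew, hw, hnbr⟩ :=
          expandSem n g bb x d' hsz hxinb hxval hgood hI5
        rw [he]
        have hd'0 : ((d' : Int)) ≠ 0 := by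
          have : (1 : Int) ≤ (d' : Int) := by exact_mod_cast hd1
          omega
        have hd'10 : ((d' : Int)) + 1 ≠ 0 := by
          have : (0 : Int) ≤ (d' : Int) := by positivity
          omega
        refine ih g' f (w ++ bb) q1t (q2' ++ w.reverse) d' (fun z => P' z ∨ z = x) hsz' ?_ ?_ ?_
        · rw [List.reverse_append, ← List.append_assoc, hfb, List.append_assoc]
        · have hlw : cntZero g' + w.length = cntZero g := hcnt
          simp only [List.length_append, List.length_cons, List.length_reverse] at hfuel' ⊢
          omega
        · refine ⟨hd1, ?_, ?_, ?_, ?_, ?_, ?_, ?_, ?_, ?_⟩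
          · intro z hz
            obtain ⟨ha, hb⟩ := hI1 z (List.mem_cons_of_mem x hz)
            exact ⟨ha, by rw [hpres z ha (by rw [hb]; exact hd'0), hb]⟩
          · intro z hz
            rcases List.mem_append.mp hz with h1 | h1
            · obtain ⟨ha, hb⟩ := hI2 z h1
              exact ⟨ha, by rw [hpres z ha (by rw [hb]; exact hd'10), hb]⟩
            · obtain ⟨ha, hb, _, _⟩ := hw z (List.mem_reverse.mp h1)
              exact ⟨ha, hb⟩
          · intro z hz hzn hm
            rcases hnew z hz hm with h1 | h1
            · rw [hpres z hz h1]
              exact hI3 z hz hzn h1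
            · obtain ⟨_, hb, _, hdist⟩ := hw z h1
              rw [hb, hdist hzn]
              push_cast
              ring
          · intro y hy
            have hyi : inb y := ⟨hy.2.1, hy.2.2⟩
            have h1 := hI4 y hy
            rw [hpres y hyi h1]
            exact h1
          · intro z hz hzn hzd
            have h1 := hI5 z hz hzn hzd
            rw [hpres z hz h1]
            exact h1
          · intro y hy hyn hyd h0
            have h0' : agetI g y = 0 := by
              by_contra hne
              rw [hpres y hy hne] at h0
              exact hne h0
            obtain ⟨x0, hx0, hst0⟩ := hI6 y hy hyn hyd h0'
            rcases List.mem_cons.mp hx0 with h1 | h1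
            · subst h1
              exact absurd h0 (hnbr y hst0)
            · exact ⟨x0, h1, hst0⟩
          · intro hm
            rcases hnew k hk hm with h1 | h1
            · rcases hI7 h1 with h2 | h2
              · rcases List.mem_cons.mp h2 with h3 | h3
                · exact absurd h3.symm hxk
                · exact Or.inl h3
              · exact Or.inr (List.mem_append.mpr (Or.inl h2))
            · exact Or.inr (List.mem_append.mpr (Or.inr (List.mem_reverse.mpr h1)))
          · intro z hz hm
            rcases hnew z hz hm with h1 | h1
            · rcases hI10 z hz h1 with h2 | h2 | h2
              · rcases List.mem_cons.mp h2 with h3 | h3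
                · exact Or.inr (Or.inr (Or.inr h3))
                · exact Or.inl h3
              · exact Or.inr (Or.inl (List.mem_append.mpr (Or.inl h2)))
              · exact Or.inr (Or.inr (Or.inl h2))
            · exact Or.inr (Or.inl (List.mem_append.mpr (Or.inr (List.mem_reverse.mpr h1))))
          · intro z hz
            rcases hz with h1 | h1
            · exact hI11 z h1
            · subst h1
              by_cases hzn : z = n
              · exact Or.inl hzn
              · refine Or.inr ⟨hxinb, ?_⟩
                have h1 := hI3 z hxinb hzn hxm
                rw [hxval] at h1
                have h2 : rdist StepF n z = d' := by exact_mod_cast h1.symm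
                omega
    rcases q1 with _ | ⟨x, q1t⟩
    · rcases q2 with _ | ⟨y, q2t⟩
      · exact absurd hInv (fun h => invA_deadEnd n k hn hk hkn g d P h)
      · have hI' := invA_switch n k hn g (y :: q2t) d P hInv
        refine key y q2t [] (d + 1) P (by simpa using hq) ?_ (by simpa using hI')
        simp only [List.length_append, List.length_cons, List.length_nil] at hfuel ⊢
        omega
    · exact key x q1t q2 d P hq hfuel hInv

lemma bfsA_eq (n k : Int) (hn : inb n) (hk : inb k) (hkn : k ≠ n) :
    bfs n k = (rdist StepF n k : Int) := by
  unfold bfs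
  have hone : (250000 : ℕ) = 249999 + 1 := rfl
  rw [hone, loopA_cons, if_neg (fun h => hkn h.symm)]
  have hsz0 : (Array.replicate 100001 (0 : Int)).size = 100001 := by simp
  have hd0 : agetI (Array.replicate 100001 (0 : Int)) n = ((0 : ℕ) : Int) := by
    rw [agetI_replicate]; rfl
  have hcomp0 : ∀ z, inb z → z ≠ n → rdist StepF n z ≤ 0 →
      agetI (Array.replicate 100001 (0 : Int)) z ≠ 0 := by
    intro z hz hzn h0
    have : rdist StepF n z = 0 := by omega
    exact absurd (rdist_eq_zero goodF hn hz this) hzn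
  obtain ⟨g1, w, he, hsz1, hcnt, hpres, hnew, hw, hnbr⟩ :=
    expandSem n (Array.replicate 100001 0) [] n 0 hsz0 hn hd0 (Or.inl Rch.zero) hcomp0
  rw [he]
  have hI5' : ∀ z, inb z → z ≠ n → rdist StepF n z ≤ 1 → agetI g1 z ≠ 0 := by
    intro z hz hzn hzd
    rcases Nat.lt_or_ge (rdist StepF n z) 1 with hlt | hge
    · have h0 : rdist StepF n z = 0 := by omega
      exact absurd (rdist_eq_zero goodF hn hz h0) hzn
    · have h1 : rdist StepF n z = 0 + 1 := by omega
      obtain ⟨x', hx'i, hx'd, hst⟩ := rdist_pred goodF hn hz h1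
      have hx'n : x' = n := rdist_eq_zero goodF hn hx'i hx'd
      subst hx'n
      exact hnbr z hst
  refine loopA_eq n k hn hk hkn 249999 g1 [] (w ++ []) w.reverse [] 1 (fun z => z = n)
    hsz1 (by simp) ?_ ?_
  · have : cntZero (Array.replicate 100001 (0 : Int)) = 100001 := cntZero_replicate
    simp only [List.length_append, List.length_reverse, List.length_nil]
    omega
  · have hmrep : ∀ z, agetI (Array.replicate 100001 (0 : Int)) z = 0 := agetI_replicate
    refine ⟨le_rfl, ?_, by simp, ?_, hnbr, hI5', ?_, ?_, ?_, fun z hz => Or.inl hz⟩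
    · intro v hv
      obtain ⟨ha, hb, _, _⟩ := hw v (List.mem_reverse.mp hv)
      refine ⟨ha, ?_⟩
      rw [hb]
      push_cast
    · intro z hz hzn hm
      rcases hnew z hz hm with h1 | h1
      · exact absurd (hmrep z) h1
      · obtain ⟨_, hb, _, hdist⟩ := hw z h1
        rw [hb, hdist hzn]
        push_cast
    · intro y hy hyn hyd h0
      obtain ⟨x', hx'i, hx'd, hst⟩ := rdist_pred goodF hn hy (by omega : rdist StepF n y = 1 + 1)
      have hx'n : x' ≠ n := by
        intro heq
        rw [heq, rdist_self] at hx'd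
        omega
      have hm : agetI g1 x' ≠ 0 := hI5' x' hx'i hx'n (by omega)
      rcases hnew x' hx'i hm with h1 | h1
      · exact absurd (hmrep x') h1
      · exact ⟨x', List.mem_reverse.mpr h1, hst⟩
    · intro hm
      rcases hnew k hk hm with h1 | h1
      · exact absurd (hmrep k) h1
      · exact Or.inl (List.mem_reverse.mpr h1)
    · intro z hz hm
      rcases hnew z hz hm with h1 | h1
      · exact absurd (hmrep z) h1
      · exact Or.inl (List.mem_reverse.mpr h1)


-- ---------- B's loop computes the backward distance ----------

lemma size_asetB (a : Array Bool) (i : Int) (v : Bool) : (asetB a i v).size = a.size :=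
  Array.size_setIfInBounds ..

lemma agetB_asetB_self (a : Array Bool) (i : Int) (v : Bool) (h : i.toNat < a.size) :
    agetB (asetB a i v) i = v := by
  simp [agetB, asetB, Array.getD_eq_getD_getElem?, h]

lemma agetB_asetB_ne (a : Array Bool) (i j : Int) (v : Bool) (h0 : 0 ≤ i) (h1 : 0 ≤ j)
    (hne : i ≠ j) : agetB (asetB a i v) j = agetB a j := by
  have h : i.toNat ≠ j.toNat := by omega
  simp [agetB, asetB, Array.getD_eq_getD_getElem?, h]

lemma agetB_replicate (i : Int) : agetB (Array.replicate 100001 false) i = false := by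
  simp [agetB, Array.getD_eq_getD_getElem?, Array.getElem?_replicate]
  split <;> rfl

lemma loopBk_succ (n : Int) (fuel : Nat) (vis : Array Bool) (frontier : List Int)
    (dist : Int) :
    loopBk n (fuel + 1) vis frontier dist =
      if frontier = [] then 0
      else if n ∈ frontier then dist
      else
        loopBk n fuel
          (frontier.foldl (fun acc y => (predsB y).foldl stepNB acc) (vis, ([] : List Int))).1
          (frontier.foldl (fun acc y => (predsB y).foldl stepNB acc) (vis, ([] : List Int))).2
          (dist + 1) := rfl

-- one candidate predecessor p of a frontier node y, with its semantic payload
lemma stepNB_sem (k : Int) (hk : inb k) (l0 : ℕ) (y p : Int) (hy : inb y)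
    (hyd : rdist StepB k y = l0) (hp : p ∈ predsB y) (v : Array Bool) (l : List Int)
    (hsz : v.size = 100001)
    (hv : ∀ z, inb z → (agetB v z = true ↔ (rdist StepB k z ≤ l0 ∨ z ∈ l)))
    (hl : ∀ q ∈ l, inb q ∧ rdist StepB k q = l0 + 1) :
    (stepNB (v, l) p).1.size = 100001 ∧
    (∀ z, inb z → (agetB (stepNB (v, l) p).1 z = true ↔
        (rdist StepB k z ≤ l0 ∨ z ∈ (stepNB (v, l) p).2))) ∧
    (∀ q ∈ (stepNB (v, l) p).2, inb q ∧ rdist StepB k q = l0 + 1) ∧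
    (∀ q ∈ l, q ∈ (stepNB (v, l) p).2) ∧
    (∀ z, inb z → agetB v z = true → agetB (stepNB (v, l) p).1 z = true) ∧
    (inb p → agetB (stepNB (v, l) p).1 p = true) := by
  by_cases hc : 0 ≤ p ∧ p ≤ MAXC ∧ agetB v p = false
  · obtain ⟨hp0, hp1, hpv⟩ := hc
    have hpinb : inb p := ⟨hp0, hp1⟩
    have hpd : rdist StepB k p = l0 + 1 := by
      have hle : rdist StepB k p ≤ l0 + 1 := by
        refine rdist_le (Rch.succ ?_ ⟨hp, hp0, hp1⟩)
        rw [← hyd]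
        exact rdist_reach goodB hk hy
      have hnot : ¬ (rdist StepB k p ≤ l0 ∨ p ∈ l) := by
        intro hor
        rw [((hv p hpinb).mpr hor)] at hpv
        cases hpv
      push Not at hnot
      omega
    have hlt : p.toNat < v.size := by
      have hM : MAXC = (100000 : Int) := rfl
      rw [hM] at hp1
      omega
    have heq : stepNB (v, l) p = (asetB v p true, l ++ [p]) := by
      simp [stepNB, hp0, hp1, hpv]
    rw [heq]
    refine ⟨by rw [size_asetB]; exact hsz, ?_, ?_, ?_, ?_, ?_⟩
    · intro z hz
      by_cases hzp : z = p
      · subst hzp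
        rw [agetB_asetB_self v z true hlt]
        simp
      · rw [agetB_asetB_ne v p z true hp0 hz.1 (fun h => hzp h.symm)]
        rw [hv z hz]
        constructor
        · intro h
          rcases h with h | h
          · exact Or.inl h
          · exact Or.inr (List.mem_append.mpr (Or.inl h))
        · intro h
          rcases h with h | h
          · exact Or.inl h
          · rcases List.mem_append.mp h with h | h
            · exact Or.inr h
            · exact absurd (List.mem_singleton.mp h) hzp
    · intro q hq
      rcases List.mem_append.mp hq with hq | hq
      · exact hl q hq
      · rcases List.mem_singleton.mp hq with rfl
        exact ⟨hpinb, hpd⟩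
    · intro q hq
      exact List.mem_append.mpr (Or.inl hq)
    · intro z hz hm
      have hzp : p ≠ z := by
        intro h
        rw [h] at hpv
        rw [hm] at hpv
        cases hpv
      rw [agetB_asetB_ne v p z true hp0 hz.1 hzp]
      exact hm
    · intro _
      exact agetB_asetB_self v p true hlt
  · have heq : stepNB (v, l) p = (v, l) := by
      simp only [stepNB, if_neg hc]
    rw [heq]
    refine ⟨hsz, hv, hl, fun q hq => hq, fun z _ h => h, ?_⟩
    intro hpinb
    rcases Bool.eq_false_or_eq_true (agetB v p) with h | h
    · exact h
    · exact absurd ⟨hpinb.1, hpinb.2, h⟩ hc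

-- the inner `for p in preds` fold for one frontier node y
lemma foldPreds_sem (k : Int) (hk : inb k) (l0 : ℕ) (y : Int) (hy : inb y)
    (hyd : rdist StepB k y = l0) :
    ∀ (ps : List Int) (v : Array Bool) (l : List Int), (∀ p ∈ ps, p ∈ predsB y) →
      v.size = 100001 →
      (∀ z, inb z → (agetB v z = true ↔ (rdist StepB k z ≤ l0 ∨ z ∈ l))) →
      (∀ q ∈ l, inb q ∧ rdist StepB k q = l0 + 1) →
      (ps.foldl stepNB (v, l)).1.size = 100001 ∧
      (∀ z, inb z → (agetB (ps.foldl stepNB (v, l)).1 z = true ↔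
          (rdist StepB k z ≤ l0 ∨ z ∈ (ps.foldl stepNB (v, l)).2))) ∧
      (∀ q ∈ (ps.foldl stepNB (v, l)).2, inb q ∧ rdist StepB k q = l0 + 1) ∧
      (∀ q ∈ l, q ∈ (ps.foldl stepNB (v, l)).2) ∧
      (∀ z, inb z → agetB v z = true → agetB (ps.foldl stepNB (v, l)).1 z = true) ∧
      (∀ p ∈ ps, inb p → agetB (ps.foldl stepNB (v, l)).1 p = true) := by
  intro ps
  induction ps with
  | nil =>
    intro v l _ hsz hv hl
    exact ⟨hsz, hv, hl, fun q hq => hq, fun z _ h => h, by simp⟩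
  | cons p ps ih =>
    intro v l hps hsz hv hl
    obtain ⟨hs1, ha1, hb1, hc1, hd1, he1⟩ :=
      stepNB_sem k hk l0 y p hy hyd (hps p (List.mem_cons_self ..)) v l hsz hv hl
    obtain ⟨hs2, ha2, hb2, hc2, hd2, he2⟩ :=
      ih (stepNB (v, l) p).1 (stepNB (v, l) p).2
        (fun q hq => hps q (List.mem_cons_of_mem p hq)) hs1 ha1 hb1
    simp only [List.foldl_cons]
    refine ⟨hs2, ha2, hb2, fun q hq => hc2 q (hc1 q hq), fun z hz h => hd2 z hz (hd1 z hz h), ?_⟩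
    intro q hq hqinb
    rcases List.mem_cons.mp hq with rfl | hq
    · exact hd2 q hqinb (he1 hqinb)
    · exact he2 q hq hqinb

-- the whole `for y in frontier` fold of one level
lemma foldFrontier_sem (k : Int) (hk : inb k) (l0 : ℕ) :
    ∀ (rem : List Int) (v : Array Bool) (l : List Int),
      (∀ y ∈ rem, inb y ∧ rdist StepB k y = l0) →
      v.size = 100001 →
      (∀ z, inb z → (agetB v z = true ↔ (rdist StepB k z ≤ l0 ∨ z ∈ l))) →
      (∀ q ∈ l, inb q ∧ rdist StepB k q = l0 + 1) →
      (rem.foldl (fun acc y => (predsB y).foldl stepNB acc) (v, l)).1.size = 100001 ∧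
      (∀ z, inb z →
          (agetB (rem.foldl (fun acc y => (predsB y).foldl stepNB acc) (v, l)).1 z = true ↔
          (rdist StepB k z ≤ l0 ∨
            z ∈ (rem.foldl (fun acc y => (predsB y).foldl stepNB acc) (v, l)).2))) ∧
      (∀ q ∈ (rem.foldl (fun acc y => (predsB y).foldl stepNB acc) (v, l)).2,
          inb q ∧ rdist StepB k q = l0 + 1) ∧
      (∀ z, inb z → rdist StepB k z = l0 + 1 → ((∃ y ∈ rem, StepB y z) ∨ z ∈ l) →
          z ∈ (rem.foldl (fun acc y => (predsB y).foldl stepNB acc) (v, l)).2) ∧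
      (∀ q ∈ l, q ∈ (rem.foldl (fun acc y => (predsB y).foldl stepNB acc) (v, l)).2) := by
  intro rem
  induction rem with
  | nil =>
    intro v l _ hsz hv hl
    refine ⟨hsz, hv, hl, ?_, fun q hq => hq⟩
    intro z _ _ h
    rcases h with ⟨y, hy, _⟩ | h
    · simp at hy
    · exact h
  | cons y rem ih =>
    intro v l hrem hsz hv hl
    obtain ⟨hyi, hyd⟩ := hrem y (List.mem_cons_self ..)
    obtain ⟨hs1, ha1, hb1, hc1, hd1, he1⟩ :=
      foldPreds_sem k hk l0 y hyi hyd (predsB y) v l (fun p hp => hp) hsz hv hl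
    obtain ⟨hs2, ha2, hb2, hc2, hd2⟩ :=
      ih ((predsB y).foldl stepNB (v, l)).1 ((predsB y).foldl stepNB (v, l)).2
        (fun q hq => hrem q (List.mem_cons_of_mem y hq)) hs1 ha1 hb1
    simp only [List.foldl_cons]
    refine ⟨hs2, ha2, hb2, ?_, fun q hq => hd2 q (hc1 q hq)⟩
    intro z hzi hzd h
    rcases h with ⟨y', hy', hst⟩ | h
    · rcases List.mem_cons.mp hy' with rfl | hy'
      · have hzv : agetB ((predsB y').foldl stepNB (v, l)).1 z = true := he1 z hst.1 hzi
        have := (ha1 z hzi).mp hzv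
        rcases this with hle | hmem
        · omega
        · exact hd2 z hmem
      · exact hc2 z hzi hzd (Or.inl ⟨y', hy', hst⟩)
    · exact hc2 z hzi hzd (Or.inr (hc1 z h))

lemma loopBk_eq (n k : Int) (hn : inb n) (hk : inb k) :
    ∀ (fuel : ℕ) (vis : Array Bool) (frontier : List Int) (l0 : ℕ),
      vis.size = 100001 →
      (∀ z, z ∈ frontier ↔ inb z ∧ rdist StepB k z = l0) →
      (∀ z, inb z → (agetB vis z = true ↔ rdist StepB k z ≤ l0)) →
      l0 ≤ rdist StepB k n →
      rdist StepB k n + 1 ≤ fuel + l0 →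
      loopBk n fuel vis frontier ((l0 : ℕ) : Int) = (rdist StepB k n : Int) := by
  intro fuel
  induction fuel with
  | zero =>
    intro vis frontier l0 _ _ _ hle hfuel
    omega
  | succ fuel ih =>
    intro vis frontier l0 hsz hfr hv hle hfuel
    obtain ⟨z0, hz0i, hz0d⟩ := exists_at_dist goodB hk hn l0 hle
    have hz0f : z0 ∈ frontier := (hfr z0).mpr ⟨hz0i, hz0d⟩
    have hne : frontier ≠ [] := List.ne_nil_of_mem hz0f
    rw [loopBk_succ, if_neg hne]
    by_cases hnf : n ∈ frontier
    · rw [if_pos hnf]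
      have := ((hfr n).mp hnf).2
      rw [this]
    · rw [if_neg hnf]
      have hgt : l0 + 1 ≤ rdist StepB k n := by
        have : rdist StepB k n ≠ l0 := fun he => hnf ((hfr n).mpr ⟨hn, he⟩)
        omega
      obtain ⟨hsF, haF, hbF, hcF, _⟩ :=
        foldFrontier_sem k hk l0 frontier vis []
          (fun y hy => (hfr y).mp hy)
          hsz
          (by intro z hz; rw [hv z hz]; simp)
          (by simp)
      have hfr' : ∀ z,
          z ∈ (frontier.foldl (fun acc y => (predsB y).foldl stepNB acc)
              (vis, ([] : List Int))).2 ↔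
          inb z ∧ rdist StepB k z = l0 + 1 := by
        intro z
        constructor
        · exact fun h => hbF z h
        · intro ⟨hzi, hzd⟩
          obtain ⟨y', hy'i, hy'd, hst⟩ := rdist_pred goodB hk hzi hzd
          exact hcF z hzi hzd (Or.inl ⟨y', (hfr y').mpr ⟨hy'i, hy'd⟩, hst⟩)
      have hv' : ∀ z, inb z →
          (agetB (frontier.foldl (fun acc y => (predsB y).foldl stepNB acc)
              (vis, ([] : List Int))).1 z = true ↔
          rdist StepB k z ≤ l0 + 1) := by
        intro z hz
        rw [haF z hz]
        constructor
        · intro hb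
          rcases hb with hb | hb
          · omega
          · rw [(hbF z hb).2]
        · intro hb
          rcases Nat.lt_or_ge (rdist StepB k z) (l0 + 1) with hlt | hge
          · exact Or.inl (by omega)
          · have he : rdist StepB k z = l0 + 1 := by omega
            exact Or.inr ((hfr' z).mpr ⟨hz, he⟩)
      have hcast : ((l0 : ℕ) : Int) + 1 = (((l0 + 1 : ℕ)) : Int) := by push_cast; ring
      rw [hcast]
      exact ih _ _ (l0 + 1) hsF hfr' hv' hgt (by omega)

lemma bfsB_eq (n k : Int) (hn : inb n) (hk : inb k) :
    bfs_alt n k = (rdist StepB k n : Int) := by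
  unfold bfs_alt
  have h0 : (0 : Int) = ((0 : ℕ) : Int) := rfl
  rw [h0]
  have hklt : k.toNat < (Array.replicate 100001 false).size := by
    have hM : MAXC = (100000 : Int) := rfl
    have := hk.2
    rw [hM] at this
    simp
    omega
  refine loopBk_eq n k hn hk 250000 (asetB (Array.replicate 100001 false) k true) [k] 0
    (by rw [size_asetB]; simp) ?_ ?_ (Nat.zero_le _) ?_
  · intro z
    simp only [List.mem_singleton]
    constructor
    · intro h
      rw [h]
      exact ⟨hk, rdist_self k⟩
    · intro ⟨ha, hb⟩
      exact rdist_eq_zero goodB hk ha hb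
  · intro z hz
    by_cases hzk : z = k
    · subst hzk
      rw [agetB_asetB_self _ _ _ hklt]
      simp [rdist_self]
    · rw [agetB_asetB_ne _ _ _ _ hk.1 hz.1 (fun h => hzk h.symm), agetB_replicate]
      simp only [Bool.false_eq_true, false_iff]
      intro hle
      exact hzk (rdist_eq_zero goodB hk hz (by omega))
  · have := rdist_bound goodB hk hn
    omega

-- ---------- final assembly ----------

lemma bfs_self (m : Int) : bfs m m = 0 := by
  unfold bfs
  have hone : (250000 : ℕ) = 249999 + 1 := rfl
  rw [hone, loopA_cons, if_pos rfl, agetI_replicate]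

lemma bfs_alt_self (m : Int) : bfs_alt m m = 0 := by
  unfold bfs_alt
  have hone : (250000 : ℕ) = 249999 + 1 := rfl
  rw [hone, loopBk_succ]
  simp

-- ===== VERDICT (by name: the statement is the Claim_ definition above) =====
theorem bfs_spec : Claim_equal_bfs := by
  intro n k _hdom hpre
  unfold Spec_bfs
  obtain ⟨h1, h2, h3, h4⟩ := hpre
  have hM : MAXC = (100000 : Int) := rfl
  have hn : inb n := ⟨h1, by rw [hM]; exact h2⟩
  have hk : inb k := ⟨h3, by rw [hM]; exact h4⟩
  by_cases hkn : k = n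
  · subst hkn
    rw [bfs_self, bfs_alt_self k]
  · rw [bfsA_eq n k hn hk hkn, bfsB_eq n k hn hk, rdist_FB n k hn hk]
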